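-- pv_equiv track=rewrite | github.com/utlond/arithmetic-calculator | calcParser.py | isInfValid
-- ===== SOURCE A (Python) =====
-- def isInfValid(tokensLabels):
--     infixValid = True
--     listLength = len(tokensLabels)
--     nuNum = tokensLabels.count("nu")
--     opNum = tokensLabels.count("op")
--     opParNum = tokensLabels.count("opPar")
--     clParNum = tokensLabels.count("clPar")
--
--     # Rule 1: Expression must contain at least 2 numbers and 1 operator.
--     if (nuNum < opNum + 1) or opNum < 1:
--         infixValid = False
--         return infixValid
--
--     # Rule 2: An operator can never occur at the start or the end of the
--     # expression.
--
--     elif tokensLabels[0] == "op" or tokensLabels[-1] == "op":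
--         infixValid = False
--         return infixValid
--
--     # Rule 3: The number of open parentheses must be equal to the number of
--     # close parentheses.
--
--     elif opParNum != clParNum:
--         infixValid = False
--         return infixValid
--
--     prev_token = tokensLabels[0]
--     for i in range(1, listLength):
--
--         # Rule 4: There can never be adjacent operator tokens or number tokens.
--
--         if prev_token == "nu" and tokensLabels[i] == "nu":
--             infixValid = False
--             return infixValid
--         elif prev_token == "op" and tokensLabels[i] == "op":
--             infixValid = False
--             return infixValid
--
--         # Rule 5: An open parenthesis token can never be immediately followed
--         # by a close parenthesis token or vice-versa.
--
--         elif prev_token == "opPar" and tokensLabels[i] == "clPar":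
--             infixValid = False
--             return infixValid
--         elif prev_token == "clPar" and tokensLabels[i] == "opPar":
--             infixValid = False
--             return infixValid
--
--         # Rule 6: An open parenthesis token can never be immediately followed
--         # by an operator token, nor can an operator token be immediately
--         # followed by a close parenthesis token.
--         elif prev_token == "opPar" and tokensLabels[i] == "op":
--             infixValid = False
--             return infixValid
--         elif prev_token == "op" and tokensLabels[i] == "clPar":
--             infixValid = False
--             return infixValid
--
--         prev_token = tokensLabels[i]
--
--     # Rule 7: Going from left to right in the expression, the number of
--     # close parentheses can at no point be greater than the number of open
--     # parentheses.
--
--     opParCnt = 0; clParCnt = 0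
--
--     for i in range(listLength):
--         if tokensLabels[i] == "opPar":
--             opParCnt += 1
--         elif tokensLabels[i] == "clPar":
--             clParCnt += 1
--         if opParCnt < clParCnt:
--             infixValid = False
--             return infixValid
--
--     return infixValid
-- ===== SOURCE B (Python) =====
-- BAD = {("nu", "nu"), ("op", "op"), ("opPar", "clPar"), ("clPar", "opPar"),
--        ("opPar", "op"), ("op", "clPar")}
--
-- def isInfValid(tokensLabels):
--     nu = op = opp = clp = bal = 0
--     prev = None
--     for t in tokensLabels:
--         if t == "nu":
--             nu += 1
--         elif t == "op":
--             op += 1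
--         elif t == "opPar":
--             opp += 1
--             bal += 1
--         elif t == "clPar":
--             clp += 1
--             bal -= 1
--         if bal < 0:
--             return False
--         if prev is not None and (prev, t) in BAD:
--             return False
--         prev = t
--     if nu < op + 1 or op < 1 or opp != clp:
--         return False
--     if tokensLabels[0] == "op" or tokensLabels[-1] == "op":
--         return False
--     return True
-- ===== Notes on version B (the rewrite author's own statement) =====
-- stated objective: alternative
-- what changed: Replaced A's four .count() scans plus two further index loops (adjacency pass, then balance pass) by one single left-to-right pass that accumulates the four counts, the previous token and the running paren balance together, rejecting immediately on a forbidden pair or negative balance; the count/endpoint rules are applied once after the pass. It trades A's several C-speed .count() scans for one interpreted loop, so it is not measurably faster.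
import Mathlib
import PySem

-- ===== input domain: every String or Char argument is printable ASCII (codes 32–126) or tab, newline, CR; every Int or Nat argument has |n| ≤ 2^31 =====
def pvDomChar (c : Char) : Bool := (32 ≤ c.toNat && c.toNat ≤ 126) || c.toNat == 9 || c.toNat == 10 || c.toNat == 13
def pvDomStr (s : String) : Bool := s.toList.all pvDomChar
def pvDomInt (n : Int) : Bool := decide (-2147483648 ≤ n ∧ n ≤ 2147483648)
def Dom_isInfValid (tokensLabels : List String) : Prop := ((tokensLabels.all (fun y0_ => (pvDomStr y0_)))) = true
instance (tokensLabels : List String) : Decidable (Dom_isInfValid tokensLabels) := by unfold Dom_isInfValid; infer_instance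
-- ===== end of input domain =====

-- B replaces A's four .count() scans and two further index loops (adjacency pass, balance pass)
-- by one single left-to-right pass accumulating the counts, the previous token and the running
-- paren balance (objective: alternative single-pass algorithm, same asymptotic cost).


-- ===== PORT A =====
-- A's Rule 4/5/6 loop 'for i in range(1, listLength)' reads tokensLabels[i] with prev_token;
-- it is transcribed as the obvious structural recursion over the tail, with the same prev_token state.
def isInfValid_rule46 (prev : String) : List String → Bool
  | [] => true
  | t :: rest =>
    if prev == "nu" && t == "nu" then false
    else if prev == "op" && t == "op" then false
    else if prev == "opPar" && t == "clPar" then false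
    else if prev == "clPar" && t == "opPar" then false
    else if prev == "opPar" && t == "op" then false
    else if prev == "op" && t == "clPar" then false
    else isInfValid_rule46 t rest

-- A's Rule 7 loop 'for i in range(listLength)' with opParCnt/clParCnt, transcribed as the
-- obvious structural recursion over the list with the same two counters.
def isInfValid_rule7 : List String → Int → Int → Bool
  | [], _, _ => true
  | t :: rest, opParCnt, clParCnt =>
    let opParCnt := if t == "opPar" then opParCnt + 1 else opParCnt
    let clParCnt := if !(t == "opPar") && t == "clPar" then clParCnt + 1 else clParCnt
    if opParCnt < clParCnt then false else isInfValid_rule7 rest opParCnt clParCnt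

def isInfValid (tokensLabels : List String) : Bool :=
  let nuNum : Int := PySem.List.count tokensLabels "nu"
  let opNum : Int := PySem.List.count tokensLabels "op"
  let opParNum : Int := PySem.List.count tokensLabels "opPar"
  let clParNum : Int := PySem.List.count tokensLabels "clPar"
  if nuNum < opNum + 1 || opNum < 1 then false
  else if ((PySem.List.pyGet? tokensLabels 0).getD "") == "op"
          || ((PySem.List.pyGet? tokensLabels (-1)).getD "") == "op" then false
  else if !(opParNum == clParNum) then false
  else
    let prev_token := (PySem.List.pyGet? tokensLabels 0).getD ""
    if !(isInfValid_rule46 prev_token tokensLabels.tail) then false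
    else isInfValid_rule7 tokensLabels 0 0

-- ===== PORT B =====
def isInfValid_BAD : List (String × String) :=
  [("nu", "nu"), ("op", "op"), ("opPar", "clPar"), ("clPar", "opPar"), ("opPar", "op"), ("op", "clPar")]

-- B's single pass: none = an early 'return False', otherwise the four accumulated counts.
def isInfValid_alt_loop : List String → Int → Int → Int → Int → Int → Option String →
    Option (Int × Int × Int × Int)
  | [], nu, op, opp, clp, _, _ => some (nu, op, opp, clp)
  | t :: rest, nu, op, opp, clp, bal, prev =>
    let nu := if t == "nu" then nu + 1 else nu
    let op := if t == "op" then op + 1 else op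
    let opp := if t == "opPar" then opp + 1 else opp
    let clp := if t == "clPar" then clp + 1 else clp
    let bal := if t == "opPar" then bal + 1 else if t == "clPar" then bal - 1 else bal
    if bal < 0 then none
    else if (match prev with
             | some p => isInfValid_BAD.contains (p, t)
             | none => false) then none
    else isInfValid_alt_loop rest nu op opp clp bal (some t)

def isInfValid_alt (tokensLabels : List String) : Bool :=
  match isInfValid_alt_loop tokensLabels 0 0 0 0 0 none with
  | none => false
  | some (nu, op, opp, clp) =>
    if nu < op + 1 || op < 1 || !(opp == clp) then false
    else if ((PySem.List.pyGet? tokensLabels 0).getD "") == "op"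
            || ((PySem.List.pyGet? tokensLabels (-1)).getD "") == "op" then false
    else true

-- ===== PRECONDITION & SPEC =====
def Spec_isInfValid (tokensLabels : List String) (out : Bool) : Prop := out = isInfValid_alt tokensLabels
instance (tokensLabels : List String) (out : Bool) : Decidable (Spec_isInfValid tokensLabels out) := by unfold Spec_isInfValid; infer_instance

-- ===== CLAIM (what is proved, stated in full; the proofs are below) =====
def Claim_equal_isInfValid : Prop := ∀ (tokensLabels : List String), Dom_isInfValid tokensLabels → Spec_isInfValid tokensLabels (isInfValid tokensLabels)

-- ===== LEMMAS AND PROOFS =====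
-- canonical forbidden-pair test (Rule 4/5/6)
def pvBadPair (p t : String) : Bool :=
  if p == "nu" && t == "nu" then true
  else if p == "op" && t == "op" then true
  else if p == "opPar" && t == "clPar" then true
  else if p == "clPar" && t == "opPar" then true
  else if p == "opPar" && t == "op" then true
  else if p == "op" && t == "clPar" then true
  else false

-- canonical adjacency check with an optional previous token
def pvAdjOK : Option String → List String → Bool
  | _, [] => true
  | prev, t :: rest =>
    !(match prev with | some p => pvBadPair p t | none => false) && pvAdjOK (some t) rest

-- canonical running-balance check (Rule 7)
def pvBalOK : Int → List String → Bool
  | _, [] => true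
  | bal, t :: rest =>
    let bal := if t == "opPar" then bal + 1 else if t == "clPar" then bal - 1 else bal
    !(bal < 0) && pvBalOK bal rest

lemma contains_BAD (p t : String) : isInfValid_BAD.contains (p, t) = pvBadPair p t := by
  simp only [isInfValid_BAD, List.contains_cons, List.contains_nil, pvBadPair, Bool.or_false]
  by_cases h1 : p = "nu" <;> by_cases h2 : p = "op" <;> by_cases h3 : p = "opPar" <;> by_cases h4 : p = "clPar" <;>
  by_cases g1 : t = "nu" <;> by_cases g2 : t = "op" <;> by_cases g3 : t = "opPar" <;> by_cases g4 : t = "clPar" <;>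
  simp_all

lemma rule46_eq (prev : String) (xs : List String) :
    isInfValid_rule46 prev xs = pvAdjOK (some prev) xs := by
  induction xs generalizing prev with
  | nil => rfl
  | cons t rest ih =>
    simp only [isInfValid_rule46, pvAdjOK, pvBadPair, ih]
    by_cases h1 : (prev == "nu" && t == "nu") = true <;>
    by_cases h2 : (prev == "op" && t == "op") = true <;>
    by_cases h3 : (prev == "opPar" && t == "clPar") = true <;>
    by_cases h4 : (prev == "clPar" && t == "opPar") = true <;>
    by_cases h5 : (prev == "opPar" && t == "op") = true <;>
    by_cases h6 : (prev == "op" && t == "clPar") = true <;>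
    simp only [Bool.not_eq_true] at * <;>
    simp [h1, h2, h3, h4, h5, h6]

lemma rule7_eq (xs : List String) (opc clc : Int) :
    isInfValid_rule7 xs opc clc = pvBalOK (opc - clc) xs := by
  induction xs generalizing opc clc with
  | nil => rfl
  | cons t rest ih =>
    simp only [isInfValid_rule7, pvBalOK]
    by_cases hop : t = "opPar"
    · subst hop
      by_cases h : opc - clc + 1 < 0
      · simp [h, show opc + 1 < clc by omega]
      · simp [ih, h, show ¬(opc + 1 < clc) by omega,
          show opc + 1 - clc = opc - clc + 1 by ring]
    · by_cases hcl : t = "clPar"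
      · subst hcl
        by_cases h : opc - clc - 1 < 0
        · simp [h, show opc < clc + 1 by omega]
        · simp [ih, h, show ¬(opc < clc + 1) by omega,
            show opc - (clc + 1) = opc - clc - 1 by ring]
      · by_cases h : opc - clc < 0
        · simp [hop, hcl, h, show opc < clc by omega]
        · simp [ih, hop, hcl, h, show ¬(opc < clc) by omega]

lemma alt_loop_eq (xs : List String) (nu op opp clp bal : Int) (prev : Option String) :
    isInfValid_alt_loop xs nu op opp clp bal prev =
      if pvAdjOK prev xs && pvBalOK bal xs then
        some (nu + xs.count "nu", op + xs.count "op", opp + xs.count "opPar", clp + xs.count "clPar")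
      else none := by
  induction xs generalizing nu op opp clp bal prev with
  | nil => simp [isInfValid_alt_loop, pvAdjOK, pvBalOK]
  | cons t rest ih =>
    simp only [isInfValid_alt_loop, contains_BAD, beq_iff_eq]
    by_cases hb : ((if t = "opPar" then bal + 1 else if t = "clPar" then bal - 1 else bal) < 0)
    · rw [if_pos hb]
      have hc : pvBalOK bal (t :: rest) = false := by
        simp only [pvBalOK, beq_iff_eq]
        by_cases h3 : t = "opPar" <;> by_cases h4 : t = "clPar" <;> simp_all
      simp [hc]
    · by_cases hp : (match prev with | some p => pvBadPair p t | none => false) = true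
      · rw [if_neg hb]
        simp [pvAdjOK, hp]
      · simp only [Bool.not_eq_true] at hp
        rw [if_neg hb, hp, ih]
        simp only [pvAdjOK, pvBalOK, List.count_cons, hp, beq_iff_eq]
        by_cases h1 : t = "nu" <;> by_cases h2 : t = "op" <;>
        by_cases h3 : t = "opPar" <;> by_cases h4 : t = "clPar" <;>
        simp_all <;>
        refine if_congr Iff.rfl (congrArg some ?_) rfl <;>
        first
          | rfl
          | (simp only [Prod.mk.injEq, and_true, true_and]; omega)

-- ===== VERDICT (by name: the statement is the Claim_ definition above) =====
theorem isInfValid_spec : Claim_equal_isInfValid := by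
  intro xs _
  show isInfValid xs = isInfValid_alt xs
  cases xs with
  | nil => decide
  | cons h t =>
    simp only [isInfValid, isInfValid_alt, alt_loop_eq, rule46_eq, rule7_eq, List.tail_cons,
      PySem.List.count_eq]
    have hadj : pvAdjOK none (h :: t) = pvAdjOK (some h) t := by simp [pvAdjOK]
    have hprev : (PySem.List.pyGet? (h :: t) 0).getD "" = h := by
      simp
    rw [hadj, hprev, show (0:Int) - 0 = 0 by norm_num]
    cases hA : pvAdjOK (some h) t <;> cases hB : pvBalOK 0 (h :: t) <;>
      simp [List.count_cons] <;> split_ifs <;> simp_all <;> first | omega | ac_rfl
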